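-- pv_equiv track=rewrite | github.com/annaoskarson/aoc2024 | 09.py | filesystem
-- ===== SOURCE A (Python) =====
-- def filesystem(fs):
--     files = {}
--     space = {}
--     fids = {}
--     i = 0
--     while i < len(fs):
--         if fs[i] == None:
--             # Start of space!
--             startpos = i
--             while i < len(fs) and fs[i] == None:
--                 i += 1
--             length = i-startpos
--             space[startpos] = length
--         else:
--             # Start of file!
--             startpos = i
--             fid = fs[i]
--             while i < len(fs) and fs[i] == fid:
--                 i += 1
--             length = i-startpos
--             files[startpos] = (length, fid)
--             fids[fid] = (startpos, length)
--     return(files, space, fids)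
-- ===== SOURCE B (Python) =====
-- def filesystem(fs):
--     n = len(fs)
--     # Stage 1: boundary positions (indices where a new maximal run begins).
--     starts = [i for i in range(n) if i == 0 or fs[i] != fs[i - 1]]
--     # Stage 2: pair each run start with the next start (or n) and classify.
--     files = {}
--     space = {}
--     fids = {}
--     for s, e in zip(starts, starts[1:] + [n]):
--         k = fs[s]
--         if k is None:
--             space[s] = e - s
--         else:
--             files[s] = (e - s, k)
--             fids[k] = (s, e - s)
--     return (files, space, fids)
-- ===== Notes on version B (the rewrite author's own statement) =====
-- stated objective: alternative
-- what changed: Instead of A's single pass with nested index-advancing while loops, B works in staged passes: it first computes the list of run boundaries by comparing each element with its predecessor, then zips consecutive boundaries (with len(fs) appended) to get (start, end) pairs and classifies each run from those pairs.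
import Mathlib
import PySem

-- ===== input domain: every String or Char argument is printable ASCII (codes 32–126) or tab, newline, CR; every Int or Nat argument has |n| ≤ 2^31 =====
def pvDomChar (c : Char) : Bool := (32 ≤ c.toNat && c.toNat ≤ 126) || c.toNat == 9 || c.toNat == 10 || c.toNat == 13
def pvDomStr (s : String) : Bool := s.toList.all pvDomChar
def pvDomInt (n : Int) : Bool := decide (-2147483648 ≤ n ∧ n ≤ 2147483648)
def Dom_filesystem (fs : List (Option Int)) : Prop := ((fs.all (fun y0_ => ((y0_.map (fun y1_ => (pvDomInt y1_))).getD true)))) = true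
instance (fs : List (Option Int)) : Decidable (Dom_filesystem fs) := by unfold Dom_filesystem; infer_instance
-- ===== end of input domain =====

-- B replaces A's single pass of nested index-advancing while loops by staged
-- passes: first the list of run-boundary positions (comparing each element with
-- its predecessor), then zipping consecutive boundaries into (start, end) pairs
-- and classifying each run (objective: alternative decomposition, same cost).

-- ===== PORT A =====

-- inner 'while i < len(fs) and fs[i] == t: i += 1' of A (t is fs[startpos]:
-- None in the space branch, fid in the file branch)
def advA (fs : List (Option Int)) (t : Option Int) (i : Nat) : Nat :=
  if h : i < fs.length then
    if fs[i] = t then advA fs t (i + 1) else i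
  else i
termination_by fs.length - i

theorem advA_ge (fs : List (Option Int)) (t : Option Int) (i : Nat) :
    i ≤ advA fs t i := by
  fun_induction advA fs t i with
  | case1 i h hv ih => omega
  | case2 i h hv => omega
  | case3 i h => omega

-- A's outer while loop; state = (i, files, space, fids).  Both branches run
-- the same inner scan with target fs[i] (A compares against None resp. fid,
-- each being fs[startpos]); the branch then records the run as A does.
def loopA (fs : List (Option Int)) (i : Nat)
    (files : PySem.Dict Int (Int × Int)) (space : PySem.Dict Int Int)
    (fids : PySem.Dict Int (Int × Int)) :
    PySem.Dict Int (Int × Int) × PySem.Dict Int Int × PySem.Dict Int (Int × Int) :=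
  if h : i < fs.length then
    let j := advA fs fs[i] i
    have hj : i < j := by
      have h1 : advA fs fs[i] i = advA fs fs[i] (i + 1) := by
        rw [advA]; simp [h]
      have h2 := advA_ge fs fs[i] (i + 1)
      omega
    let length : Int := (j : Int) - (i : Int)
    match fs[i] with
    | none => loopA fs j files (space.insert (i : Int) length) fids
    | some fid =>
        loopA fs j (files.insert (i : Int) (length, fid)) space
          (fids.insert fid ((i : Int), length))
  else (files, space, fids)
termination_by fs.length - i

def filesystem (fs : List (Option Int)) :
    (List (Int × Int × Int)) × (List (Int × Int)) × (List (Int × Int × Int)) :=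
  let r := loopA fs 0 PySem.Dict.empty PySem.Dict.empty PySem.Dict.empty
  (r.1.items, r.2.1.items, r.2.2.items)

-- ===== PORT B =====

-- starts = [i for i in range(n) if i == 0 or fs[i] != fs[i-1]]
-- (indices are in range whenever they are evaluated with i > 0; at i = 0 the
-- left disjunct already decides the Bool, so pyGetD's default never matters)
def startsB (fs : List (Option Int)) : List Int :=
  (PySem.List.pyRange 0 (fs.length : Int) 1).filter
    (fun i => i == 0 ||
      !(PySem.List.pyGetD fs i none == PySem.List.pyGetD fs (i - 1) none))

-- body of B's classification loop over a (start, end) pair; k = fs[s]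
def stepB (fs : List (Option Int))
    (acc : PySem.Dict Int (Int × Int) × PySem.Dict Int Int × PySem.Dict Int (Int × Int))
    (p : Int × Int) :
    PySem.Dict Int (Int × Int) × PySem.Dict Int Int × PySem.Dict Int (Int × Int) :=
  match PySem.List.pyGetD fs p.1 none with
  | none => (acc.1, acc.2.1.insert p.1 (p.2 - p.1), acc.2.2)
  | some fid =>
      (acc.1.insert p.1 (p.2 - p.1, fid), acc.2.1, acc.2.2.insert fid (p.1, p.2 - p.1))

def filesystem_alt (fs : List (Option Int)) :
    (List (Int × Int × Int)) × (List (Int × Int)) × (List (Int × Int × Int)) :=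
  let n : Int := fs.length
  let starts := startsB fs
  let r := (starts.zip (PySem.List.slice starts (some 1) none ++ [n])).foldl
    (stepB fs) (PySem.Dict.empty, PySem.Dict.empty, PySem.Dict.empty)
  (r.1.items, r.2.1.items, r.2.2.items)

-- ===== PRECONDITION & SPEC =====
def Spec_filesystem (fs : List (Option Int)) (out : (List (Int × Int × Int)) × (List (Int × Int)) × (List (Int × Int × Int))) : Prop := out = filesystem_alt fs
instance (fs : List (Option Int)) (out : (List (Int × Int × Int)) × (List (Int × Int)) × (List (Int × Int × Int))) : Decidable (Spec_filesystem fs out) := by unfold Spec_filesystem; infer_instance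

-- ===== CLAIM (what is proved, stated in full; the proofs are below) =====
def Claim_equal_filesystem : Prop := ∀ (fs : List (Option Int)), Dom_filesystem fs → Spec_filesystem fs (filesystem fs)

-- ===== LEMMAS AND PROOFS =====

-- Nat-level boundary predicate and boundary list from position i on
def bndN (fs : List (Option Int)) (i : Nat) : Bool :=
  i == 0 || fs.getD i none != fs.getD (i - 1) none

def startsN (fs : List (Option Int)) (i : Nat) : List Nat :=
  (List.range' i (fs.length - i)).filter (bndN fs)

def pairsI (l : List Int) (n : Int) : List (Int × Int) :=
  l.zip (l.tail ++ [n])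

theorem advA_le (fs : List (Option Int)) (t : Option Int) (i : Nat)
    (h : i ≤ fs.length) : advA fs t i ≤ fs.length := by
  fun_induction advA fs t i with
  | case1 i h' hv ih => exact ih (by omega)
  | case2 i h' hv => omega
  | case3 i h' => omega

theorem advA_lt (fs : List (Option Int)) (t : Option Int) (i : Nat)
    (h : i < fs.length) (hv : fs[i] = t) : i < advA fs t i := by
  have h1 : advA fs t i = advA fs t (i + 1) := by
    rw [advA, dif_pos h, if_pos hv]
  have h2 := advA_ge fs t (i + 1)
  omega

-- every scanned cell holds the target value
theorem advA_scan (fs : List (Option Int)) (t : Option Int) (i : Nat) :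
    ∀ k, i ≤ k → k < advA fs t i → fs.getD k none = t := by
  fun_induction advA fs t i with
  | case1 i h hv ih =>
      intro k hk1 hk2
      rcases Nat.eq_or_lt_of_le hk1 with rfl | hlt
      · rw [List.getD_eq_getElem fs none h]; exact hv
      · exact ih k hlt hk2
  | case2 i h hv => intro k hk1 hk2; omega
  | case3 i h => intro k hk1 hk2; omega

-- if the scan stops inside the list, the stopping cell differs from the target
theorem advA_stop_ne (fs : List (Option Int)) (t : Option Int) (i : Nat)
    (h : advA fs t i < fs.length) : fs.getD (advA fs t i) none ≠ t := by
  fun_induction advA fs t i with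
  | case1 i h' hv ih => exact ih h
  | case2 i h' hv => rw [List.getD_eq_getElem fs none h']; exact hv
  | case3 i h' => omega

theorem bndN_pos (fs : List (Option Int)) (k : Nat) (hk : k ≠ 0) :
    bndN fs k = (fs.getD k none != fs.getD (k - 1) none) := by
  have h0 : (k == 0) = false := by simpa using hk
  rw [bndN, h0, Bool.false_or]

theorem startsN_nil (fs : List (Option Int)) (i : Nat) (h : fs.length ≤ i) :
    startsN fs i = [] := by
  unfold startsN
  rw [Nat.sub_eq_zero_of_le h]
  rfl

theorem startsN_cons (fs : List (Option Int)) (i : Nat) (t : Option Int)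
    (h : i < fs.length) (htg : fs[i] = t) (hb : bndN fs i = true) :
    startsN fs i = i :: startsN fs (advA fs t i) := by
  have hij : i < advA fs t i := advA_lt fs t i h htg
  set j := advA fs t i with hjdef
  have hjn : j ≤ fs.length := advA_le fs t i (by omega)
  unfold startsN
  have hsplit : List.range' i (fs.length - i) =
      List.range' i (j - i) ++ List.range' j (fs.length - j) := by
    have hap := List.range'_append (s := i) (m := j - i) (n := fs.length - j) (step := 1)
    rw [show i + 1 * (j - i) = j by omega] at hap
    rw [show (j - i) + (fs.length - j) = fs.length - i by omega] at hap
    exact hap.symm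
  rw [hsplit, List.filter_append]
  have hx : List.range' i (j - i) = i :: List.range' (i + 1) (j - i - 1) := by
    conv_lhs => rw [show j - i = (j - i - 1) + 1 by omega]
    rw [List.range'_succ]
  have hfirst : (List.range' i (j - i)).filter (bndN fs) = [i] := by
    rw [hx, List.filter_cons, if_pos hb]
    have hnil : (List.range' (i + 1) (j - i - 1)).filter (bndN fs) = [] := by
      rw [List.filter_eq_nil_iff]
      intro k hk
      rw [List.mem_range'_1] at hk
      have hk1 : fs.getD k none = t := advA_scan fs t i k (by omega) (by omega)
      have hk2 : fs.getD (k - 1) none = t := advA_scan fs t i (k - 1) (by omega) (by omega)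
      rw [bndN_pos fs k (by omega), hk1, hk2]
      simp
    rw [hnil]
  rw [hfirst]
  rfl

-- the stopping position of a scan that stops inside the list is a boundary
theorem bnd_advA (fs : List (Option Int)) (i : Nat) (t : Option Int)
    (h : i < fs.length) (htg : fs[i] = t)
    (hj : advA fs t i < fs.length) : bndN fs (advA fs t i) = true := by
  have hij : i < advA fs t i := advA_lt fs t i h htg
  set j := advA fs t i with hjdef
  have h1 : fs.getD j none ≠ t := advA_stop_ne fs t i hj
  have h2 : fs.getD (j - 1) none = t := advA_scan fs t i (j - 1) (by omega) (by omega)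
  rw [bndN_pos fs j (by omega), h2]
  exact bne_iff_ne.mpr h1

-- the Int boundary list B computes is the cast of the Nat one
theorem startsB_eq (fs : List (Option Int)) :
    startsB fs = (startsN fs 0).map (fun (k : Nat) => (k : Int)) := by
  unfold startsB startsN
  rw [PySem.List.pyRange_one]
  simp only [Int.sub_zero, Int.toNat_natCast, Int.zero_add, Nat.sub_zero]
  rw [← List.range_eq_range']
  have hfil : List.filter
      ((fun i => i == 0 ||
        !(PySem.List.pyGetD fs i none == PySem.List.pyGetD fs (i - 1) none)) ∘
        fun (k : Nat) => (k : Int)) (List.range fs.length) =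
      List.filter (bndN fs) (List.range fs.length) := by
    apply List.filter_congr
    intro k _
    simp only [Function.comp]
    cases k with
    | zero => simp [bndN]
    | succ m =>
        have hcast : ((m + 1 : Nat) : Int) - 1 = ((m : Nat) : Int) := by push_cast; omega
        have hne : (((m + 1 : Nat) : Int) == 0) = false := by simp; omega
        rw [bndN_pos fs (m + 1) (by omega), hcast, hne]
        simp only [PySem.List.pyGetD_natCast, Bool.false_or]
        rfl
  rw [List.filter_map, hfil]

-- pairing step: with i a boundary and j the end of its run, the first pair is (i, j)
theorem pairsI_cons (fs : List (Option Int)) (i : Nat) (t : Option Int)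
    (h : i < fs.length) (htg : fs[i] = t) (hb : bndN fs i = true) :
    pairsI ((startsN fs i).map (fun (k : Nat) => (k : Int))) (fs.length : Int) =
      ((i : Int), ((advA fs t i : Nat) : Int)) ::
        pairsI ((startsN fs (advA fs t i)).map (fun (k : Nat) => (k : Int))) (fs.length : Int) := by
  have hij : i < advA fs t i := advA_lt fs t i h htg
  set j := advA fs t i with hjdef
  have hjn : j ≤ fs.length := advA_le fs t i (by omega)
  rw [startsN_cons fs i t h htg hb, ← hjdef]
  rcases Nat.eq_or_lt_of_le hjn with heq | hlt
  · rw [startsN_nil fs j (by omega)]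
    simp [pairsI, heq]
  · obtain ⟨u, hu⟩ : ∃ u, fs[j] = u := ⟨_, rfl⟩
    rw [startsN_cons fs j u hlt hu (bnd_advA fs i t h htg hlt)]
    simp [pairsI]

-- main loop correspondence: A's outer loop from any boundary equals B's fold
theorem loopA_eq (fs : List (Option Int)) :
    ∀ n i, fs.length - i = n → i ≤ fs.length →
    (fs.length ≤ i ∨ bndN fs i = true) →
    ∀ files space fids,
    loopA fs i files space fids =
      (pairsI ((startsN fs i).map (fun (k : Nat) => (k : Int))) (fs.length : Int)).foldl
        (stepB fs) (files, space, fids) := by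
  intro n
  induction n using Nat.strong_induction_on with
  | _ n ih =>
      intro i hn hile hbnd files space fids
      by_cases h : i < fs.length
      · have hb : bndN fs i = true := by rcases hbnd with h' | h' <;> [omega; exact h']
        obtain ⟨v, hv⟩ : ∃ v, fs[i] = v := ⟨_, rfl⟩
        have hgd : fs.getD i none = v := by rw [List.getD_eq_getElem fs none h, hv]
        have hij : i < advA fs v i := advA_lt fs v i h hv
        have hjn : advA fs v i ≤ fs.length := advA_le fs v i (by omega)
        have hnext : fs.length ≤ advA fs v i ∨ bndN fs (advA fs v i) = true := by
          rcases Nat.eq_or_lt_of_le hjn with heq | hlt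
          · left; omega
          · right; exact bnd_advA fs i v h hv hlt
        rw [pairsI_cons fs i v h hv hb, List.foldl_cons]
        rw [loopA, dif_pos h]
        simp only [hv]
        cases v with
        | none =>
            show loopA fs (advA fs none i) files
              (space.insert (i : Int) ((advA fs none i : Int) - (i : Int))) fids = _
            rw [ih (fs.length - advA fs none i) (by omega) (advA fs none i) rfl
              (by omega) hnext]
            have : stepB fs (files, space, fids) ((i : Int), ((advA fs none i : Nat) : Int)) =
                (files, space.insert (i : Int) ((advA fs none i : Int) - (i : Int)), fids) := by
              unfold stepB
              simp only [PySem.List.pyGetD_natCast, hgd]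
            rw [this]
        | some fid =>
            show loopA fs (advA fs (some fid) i)
              (files.insert (i : Int) ((advA fs (some fid) i : Int) - (i : Int), fid)) space
              (fids.insert fid ((i : Int), (advA fs (some fid) i : Int) - (i : Int))) = _
            rw [ih (fs.length - advA fs (some fid) i) (by omega) (advA fs (some fid) i) rfl
              (by omega) hnext]
            have : stepB fs (files, space, fids)
                ((i : Int), ((advA fs (some fid) i : Nat) : Int)) =
                (files.insert (i : Int) ((advA fs (some fid) i : Int) - (i : Int), fid), space,
                  fids.insert fid ((i : Int), (advA fs (some fid) i : Int) - (i : Int))) := by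
              unfold stepB
              simp only [PySem.List.pyGetD_natCast, hgd]
            rw [this]
      · rw [loopA, dif_neg h]
        rw [startsN_nil fs i (by omega)]
        simp [pairsI]

-- ===== VERDICT (by name: the statement is the Claim_ definition above) =====
theorem filesystem_spec : Claim_equal_filesystem := by
  intro fs _
  unfold Spec_filesystem
  show filesystem fs = filesystem_alt fs
  have hB : filesystem_alt fs =
      (fun r => (r.1.items, r.2.1.items, r.2.2.items))
        (((startsB fs).zip ((startsB fs).tail ++ [(fs.length : Int)])).foldl
          (stepB fs) (PySem.Dict.empty, PySem.Dict.empty, PySem.Dict.empty)) := by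
    show (fun r => (r.1.items, r.2.1.items, r.2.2.items))
        (((startsB fs).zip (PySem.List.slice (startsB fs) (some 1) none ++ [(fs.length : Int)])).foldl
          (stepB fs) (PySem.Dict.empty, PySem.Dict.empty, PySem.Dict.empty)) = _
    rw [PySem.List.slice_from_one]
  rw [hB, startsB_eq]
  have h0 : fs.length ≤ 0 ∨ bndN fs 0 = true := by
    by_cases h : fs.length = 0
    · left; omega
    · right; simp [bndN]
  have hmain := loopA_eq fs (fs.length - 0) 0 rfl (by omega) h0
    PySem.Dict.empty PySem.Dict.empty PySem.Dict.empty
  show (fun r => (r.1.items, r.2.1.items, r.2.2.items))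
    (loopA fs 0 PySem.Dict.empty PySem.Dict.empty PySem.Dict.empty) = _
  rw [hmain]
  have htail : ((startsN fs 0).map (fun (k : Nat) => (k : Int))).tail =
      ((startsN fs 0).tail).map (fun (k : Nat) => (k : Int)) := by
    cases startsN fs 0 <;> rfl
  simp only [pairsI, htail]
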